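-- pv_equiv track=rewrite | github.com/prashusat/Experiments-with-LDA | pp4.py | generate_d_initial
-- ===== SOURCE A (Python) =====
-- def generate_d_initial(data_list):
--     ct=0
--     d=[]
--     for i in data_list:
--         for j in i:
--             d+=[ct]
--         ct+=1
--     return d,ct
-- ===== SOURCE B (Python) =====
-- def generate_d_initial(data_list):
--     # pass 1: cumulative end positions of each sublist in the flattened order
--     cum = []
--     t = 0
--     for sub in data_list:
--         t += len(sub)
--         cum.append(t)
--     # pass 2: walk the flat positions 0..t-1; a pointer advances past every
--     # cumulative boundary <= the position, so it names the containing sublist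
--     d = []
--     i = 0
--     for k in range(t):
--         while cum[i] <= k:
--             i += 1
--         d.append(i)
--     return d, len(data_list)
-- ===== Notes on version B (the rewrite author's own statement) =====
-- stated objective: alternative
-- what changed: Instead of emitting the counter once per element inside a nested loop, B first builds the list of cumulative sublist-end positions and then walks the flat positions 0..total-1 with a pointer that advances past each boundary, assigning every position the index of its containing sublist.
import Mathlib
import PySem

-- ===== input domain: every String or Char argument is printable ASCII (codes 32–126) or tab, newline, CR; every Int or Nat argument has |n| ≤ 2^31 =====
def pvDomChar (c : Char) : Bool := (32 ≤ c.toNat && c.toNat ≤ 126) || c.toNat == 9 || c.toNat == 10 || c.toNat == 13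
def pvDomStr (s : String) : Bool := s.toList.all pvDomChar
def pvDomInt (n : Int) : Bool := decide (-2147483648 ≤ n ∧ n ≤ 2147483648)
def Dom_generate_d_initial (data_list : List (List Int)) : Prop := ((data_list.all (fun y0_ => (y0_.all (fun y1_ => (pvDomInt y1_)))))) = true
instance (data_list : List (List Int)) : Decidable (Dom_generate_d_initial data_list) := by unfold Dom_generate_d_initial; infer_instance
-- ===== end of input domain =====

-- B replaces A's nested per-element counter emission by two staged passes: prefix sums of
-- lengths, then a pointer walk over the flat positions; an alternative algorithm, same cost.

-- ===== PORT A =====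
-- nested loops: for i in data_list: for j in i: d += [ct]; ct += 1
def generate_d_initial (data_list : List (List Int)) : List Int × Int :=
  let s := data_list.foldl
    (fun (s : List Int × Int) i =>
      (i.foldl (fun d _j => d ++ [s.2]) s.1, s.2 + 1))
    ([], 0)
  (s.1, s.2)

-- ===== PORT B =====
-- 'while cum[i] <= k: i += 1' — fuel-bounded recursion; cum[i] via pyGet? (none = IndexError
-- stops the recursion; on the inputs reached here the index is always in range)
def whileAdv (cum : List Int) (k : Int) : Nat → Int → Int
  | 0, i => i
  | fuel + 1, i =>
    match PySem.List.pyGet? cum i with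
    | some c => if c ≤ k then whileAdv cum k fuel (i + 1) else i
    | none => i

-- pass 1: cum/t; pass 2: for k in range(t): while cum[i] <= k: i += 1; d.append(i)
def generate_d_initial_alt (data_list : List (List Int)) : List Int × Int :=
  let cb := data_list.foldl
    (fun (s : List Int × Int) sub => (s.1 ++ [s.2 + (sub.length : Int)], s.2 + (sub.length : Int)))
    ([], 0)
  let cum := cb.1
  let t := cb.2
  let st := (PySem.List.pyRange 0 t 1).foldl
    (fun (s : Int × List Int) k =>
      let i := whileAdv cum k (cum.length + 1) s.1
      (i, s.2 ++ [i]))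
    ((0 : Int), ([] : List Int))
  (st.2, (data_list.length : Int))

-- ===== PRECONDITION & SPEC =====
def Spec_generate_d_initial (data_list : List (List Int)) (out : List Int × Int) : Prop := out = generate_d_initial_alt data_list
instance (data_list : List (List Int)) (out : List Int × Int) : Decidable (Spec_generate_d_initial data_list out) := by unfold Spec_generate_d_initial; infer_instance

-- ===== CLAIM (what is proved, stated in full; the proofs are below) =====
def Claim_equal_generate_d_initial : Prop := ∀ (data_list : List (List Int)), Dom_generate_d_initial data_list → Spec_generate_d_initial data_list (generate_d_initial data_list)

-- ===== LEMMAS AND PROOFS =====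

-- the intended flat label list: sublist index repeated once per element
def labelsI : Int → List (List Int) → List Int
  | _, [] => []
  | c, x :: xs => List.replicate x.length c ++ labelsI (c + 1) xs

-- total number of elements, cumulative end positions starting at s
def sumLen : List (List Int) → Int
  | [] => 0
  | x :: xs => (x.length : Int) + sumLen xs

def cums : Int → List (List Int) → List Int
  | _, [] => []
  | s, x :: xs => (s + (x.length : Int)) :: cums (s + (x.length : Int)) xs

theorem sumLen_nonneg (xs : List (List Int)) : 0 ≤ sumLen xs := by
  induction xs with
  | nil => simp [sumLen]
  | cons x xs ih => simp [sumLen]; omega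

-- ===== A side =====
theorem inner_loop_replicate (i : List Int) (d : List Int) (c : Int) :
    i.foldl (fun d _j => d ++ [c]) d = d ++ List.replicate i.length c := by
  induction i generalizing d with
  | nil => simp
  | cons x xs ih =>
      rw [List.foldl_cons, ih, List.append_assoc]
      rfl

theorem A_loop (dl : List (List Int)) (d : List Int) (c : Int) :
    dl.foldl (fun (s : List Int × Int) i =>
        (i.foldl (fun d _j => d ++ [s.2]) s.1, s.2 + 1)) (d, c)
      = (d ++ labelsI c dl, c + dl.length) := by
  induction dl generalizing d c with
  | nil => simp [labelsI]
  | cons x xs ih =>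
      rw [List.foldl_cons, inner_loop_replicate, ih]
      simp only [labelsI, Prod.mk.injEq, List.append_assoc, List.length_cons]
      exact ⟨trivial, by push_cast; ring⟩

-- ===== B side =====
theorem cums_build (xs : List (List Int)) (acc : List Int) (c : Int) :
    xs.foldl (fun (s : List Int × Int) sub =>
        (s.1 ++ [s.2 + (sub.length : Int)], s.2 + (sub.length : Int))) (acc, c)
      = (acc ++ cums c xs, c + sumLen xs) := by
  induction xs generalizing acc c with
  | nil => simp [cums, sumLen]
  | cons x xs ih =>
      rw [List.foldl_cons, ih]
      simp only [cums, sumLen, Prod.mk.injEq, List.append_assoc, List.singleton_append]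
      exact ⟨trivial, by ring⟩

theorem whileAdv_takeWhile (cum : List Int) (k : Int) (u : List Int) :
    ∀ (fuel : Nat) (i : Int), 0 ≤ i → cum.drop i.toNat = u → u.length < fuel →
      whileAdv cum k fuel i = i + ((u.takeWhile (fun c => decide (c ≤ k))).length : Int) := by
  induction u with
  | nil =>
      intro fuel i hi hdrop hfuel
      match fuel with
      | fuel + 1 =>
        have hnone : PySem.List.pyGet? cum i = none := by
          rw [PySem.List.pyGet?_of_nonneg cum hi, ← List.head?_drop, hdrop]; rfl
        simp [whileAdv, hnone]
  | cons c rest ih =>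
      intro fuel i hi hdrop hfuel
      match fuel with
      | fuel + 1 =>
        have hsome : PySem.List.pyGet? cum i = some c := by
          rw [PySem.List.pyGet?_of_nonneg cum hi, ← List.head?_drop, hdrop]; rfl
        by_cases hck : c ≤ k
        · have hdrop' : cum.drop (i + 1).toNat = rest := by
            have : (i + 1).toNat = i.toNat + 1 := by omega
            rw [this, ← List.drop_drop, hdrop]; rfl
          have := ih fuel (i + 1) (by omega) hdrop' (by simpa using Nat.lt_of_succ_lt_succ hfuel)
          simp [whileAdv, hsome, hck, this]
          ring
        · simp [whileAdv, hsome, hck]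

theorem takeWhile_pend (k e : Int) (pend rest : List Int)
    (hp : ∀ c ∈ pend, c ≤ k) (he : ¬ e ≤ k) :
    (pend ++ e :: rest).takeWhile (fun c => decide (c ≤ k)) = pend := by
  induction pend with
  | nil => simp [he]
  | cons c cs ih =>
      have hc : c ≤ k := hp c (by simp)
      simp only [List.cons_append, List.takeWhile_cons, decide_eq_true_eq]
      rw [if_pos hc, ih (fun c hc => hp c (by simp [hc]))]

-- one nonempty chunk of positions [a, a+n+1), all strictly below the next boundary e
theorem chunk_fold (cum : List Int) (e : Int) (rest : List Int) :
    ∀ (n : Nat) (a : Int) (i : Int) (pend : List Int) (d : List Int),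
      0 ≤ i → cum.drop i.toNat = pend ++ e :: rest →
      (∀ c ∈ pend, c ≤ a) → (∀ k : Int, a ≤ k → k < a + (n + 1 : Nat) → k < e) →
      (PySem.List.pyRange a (a + (n + 1 : Nat)) 1).foldl
          (fun (s : Int × List Int) k =>
            let i := whileAdv cum k (cum.length + 1) s.1
            (i, s.2 ++ [i]))
          (i, d)
        = (i + pend.length, d ++ List.replicate (n + 1) (i + (pend.length : Int))) := by
  intro n
  induction n with
  | zero =>
      intro a i pend d hi hdrop hpend hlt
      rw [show a + ((0 + 1 : Nat) : Int) = a + 1 by push_cast; ring, PySem.List.pyRange_one_singleton]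
      have hfuel : (pend ++ e :: rest).length < cum.length + 1 := by
        have := hdrop ▸ (List.length_drop (l := cum) (i := i.toNat))
        omega
      have hW := whileAdv_takeWhile cum a (pend ++ e :: rest) (cum.length + 1) i hi hdrop hfuel
      rw [takeWhile_pend a e pend rest hpend (by have := hlt a le_rfl (by push_cast; omega); omega)] at hW
      simp [hW]
  | succ n ih =>
      intro a i pend d hi hdrop hpend hlt
      have hcons : PySem.List.pyRange a (a + ((n + 1 + 1 : Nat) : Int)) 1
          = a :: PySem.List.pyRange (a + 1) (a + ((n + 1 + 1 : Nat) : Int)) 1 :=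
        PySem.List.pyRange_one_cons (by push_cast; omega)
      rw [hcons, List.foldl_cons]
      have hfuel : (pend ++ e :: rest).length < cum.length + 1 := by
        have := hdrop ▸ (List.length_drop (l := cum) (i := i.toNat))
        omega
      have hW := whileAdv_takeWhile cum a (pend ++ e :: rest) (cum.length + 1) i hi hdrop hfuel
      rw [takeWhile_pend a e pend rest hpend (by have := hlt a le_rfl (by push_cast; omega); omega)] at hW
      have hdrop' : cum.drop (i + (pend.length : Int)).toNat = [] ++ e :: rest := by
        have : (i + (pend.length : Int)).toNat = i.toNat + pend.length := by omega
        rw [this, ← List.drop_drop, hdrop, List.nil_append, List.drop_left]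
      have harg : a + ((n + 1 + 1 : Nat) : Int) = (a + 1) + ((n + 1 : Nat) : Int) := by
        push_cast; ring
      have := ih (a + 1) (i + pend.length) [] (d ++ [i + (pend.length : Int)])
        (by omega) hdrop' (by simp)
        (fun k hk1 hk2 => hlt k (by omega) (by push_cast at hk2 ⊢; omega))
      rw [harg]
      simp only [hW]
      rw [this]
      simp [List.replicate_succ, List.append_assoc]

-- the main pass-2 invariant: pointer j, pending boundaries ≤ s already behind the positions
theorem B_main (cum : List Int) :
    ∀ (xs : List (List Int)) (s j : Int) (pend : List Int) (d : List Int),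
      0 ≤ j → cum.drop j.toNat = pend ++ cums s xs → (∀ c ∈ pend, c ≤ s) →
      ∃ j', (PySem.List.pyRange s (s + sumLen xs) 1).foldl
          (fun (st : Int × List Int) k =>
            let i := whileAdv cum k (cum.length + 1) st.1
            (i, st.2 ++ [i]))
          (j, d)
        = (j', d ++ labelsI (j + pend.length) xs) := by
  intro xs
  induction xs with
  | nil =>
      intro s j pend d hj hdrop hpend
      exact ⟨j, by simp [sumLen, labelsI]⟩
  | cons x xs ih =>
      intro s j pend d hj hdrop hpend
      match hx : x.length with
      | 0 =>
          have hcums : cums s (x :: xs) = s :: cums s xs := by simp [cums, hx]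
          have hsum : sumLen (x :: xs) = sumLen xs := by simp [sumLen, hx]
          have hdrop' : cum.drop j.toNat = (pend ++ [s]) ++ cums s xs := by
            rw [hdrop, hcums]; simp
          obtain ⟨j', hj'⟩ := ih s j (pend ++ [s]) d hj hdrop'
            (by intro c hc; rcases List.mem_append.1 hc with h | h
                · exact hpend c h
                · simp at h; omega)
          refine ⟨j', ?_⟩
          rw [hsum, hj']
          simp [labelsI, hx]
          ring_nf
      | n + 1 =>
          have hsplit : PySem.List.pyRange s (s + sumLen (x :: xs)) 1
              = PySem.List.pyRange s (s + ((n + 1 : Nat) : Int)) 1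
                ++ PySem.List.pyRange (s + ((n + 1 : Nat) : Int)) (s + sumLen (x :: xs)) 1 := by
            refine PySem.List.pyRange_one_append s (s + ((n + 1 : Nat) : Int)) _ (by push_cast; omega) ?_
            have := sumLen_nonneg xs
            simp [sumLen, hx]; omega
          have hdropc : cum.drop j.toNat = pend ++ (s + ((n + 1 : Nat) : Int)) :: cums (s + ((n + 1 : Nat) : Int)) xs := by
            rw [hdrop]; simp [cums, hx]
          rw [hsplit, List.foldl_append]
          rw [chunk_fold cum (s + ((n + 1 : Nat) : Int)) (cums (s + ((n + 1 : Nat) : Int)) xs)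
                n s j pend d hj hdropc hpend (fun k hk1 hk2 => hk2)]
          have hdrop2 : cum.drop (j + (pend.length : Int)).toNat
              = [s + ((n + 1 : Nat) : Int)] ++ cums (s + ((n + 1 : Nat) : Int)) xs := by
            have : (j + (pend.length : Int)).toNat = j.toNat + pend.length := by omega
            rw [this, ← List.drop_drop, hdropc, List.drop_left]
            rfl
          obtain ⟨j', hj'⟩ := ih (s + ((n + 1 : Nat) : Int)) (j + pend.length)
            [s + ((n + 1 : Nat) : Int)] (d ++ List.replicate (n + 1) (j + (pend.length : Int)))
            (by omega) hdrop2 (by simp)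
          refine ⟨j', ?_⟩
          have hend : s + sumLen (x :: xs) = (s + ((n + 1 : Nat) : Int)) + sumLen xs := by
            simp [sumLen, hx]; ring
          rw [hend, hj']
          simp [labelsI, hx, List.append_assoc]

-- ===== VERDICT (by name: the statement is the Claim_ definition above) =====
theorem generate_d_initial_spec : Claim_equal_generate_d_initial := by
  intro dl _
  show generate_d_initial dl = generate_d_initial_alt dl
  unfold generate_d_initial generate_d_initial_alt
  rw [A_loop, cums_build]
  simp only [List.nil_append, zero_add]
  obtain ⟨j', hj'⟩ := B_main (cums 0 dl) dl 0 0 [] [] le_rfl (by simp) (by simp)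
  simp only [List.length_nil, Int.natCast_zero, add_zero, zero_add, List.nil_append] at hj'
  rw [hj']
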